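-- pv_equiv track=rewrite | github.com/lala991204/Algorithm | [6] 부녀회장이 될테야.py | people_num
-- ===== SOURCE A (Python) =====
-- def people_num(house):
--     '''
--     ex) 3층의 6호 -> 2층: [1,1,1,1,1,1] -> 1층: [6,5,4,3,2,1] -> 0층: [21,15,10,6,3,1] (descending sum)
--     '''
--     k, n = house[0]-1, house[1]
--     cnt_list = [1]*n
--     while k != 0:
--         for i in range(n-1):
--             cnt_list[i] = sum(cnt_list[i:])
--         k -= 1
--     return sum([cnt_list[i] * (i+1) for i in range(n)])
-- ===== SOURCE B (Python) =====
-- def people_num(house):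
--     # Closed form: the answer is the binomial coefficient C(n + f, f + 1)
--     # (f = floor = house[0], n = room = house[1]), computed by the exact
--     # multiplicative scheme r <- r * (n - 1 + i) // i, i = 1 .. f + 1.
--     f, n = house[0], house[1]
--     if n <= 0:
--         return 0
--     r = 1
--     for i in range(1, f + 2):
--         r = r * (n - 1 + i) // i
--     return r
-- ===== Notes on version B (the rewrite author's own statement) =====
-- stated objective: simpler
-- what changed: Replaces the k rounds of in-place quadratic suffix-sum passes plus a weighted final sum by the binomial closed form C(n+f, f+1), computed with the exact multiplicative binomial scheme in one short loop.
import Mathlib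
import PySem

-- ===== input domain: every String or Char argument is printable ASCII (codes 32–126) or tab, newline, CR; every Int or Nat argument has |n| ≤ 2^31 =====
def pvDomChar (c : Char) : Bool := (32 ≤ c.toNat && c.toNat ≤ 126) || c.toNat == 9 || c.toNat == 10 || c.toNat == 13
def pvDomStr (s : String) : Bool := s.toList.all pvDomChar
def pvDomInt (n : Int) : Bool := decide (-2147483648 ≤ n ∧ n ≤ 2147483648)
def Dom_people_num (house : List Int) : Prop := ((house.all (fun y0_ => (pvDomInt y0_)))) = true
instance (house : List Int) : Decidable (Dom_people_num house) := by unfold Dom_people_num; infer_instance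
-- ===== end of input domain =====

-- B replaces A's repeated in-place suffix-sum passes by the binomial closed form
-- C(n+f, f+1) computed with the exact multiplicative scheme (objective: simpler).

-- ===== PORT A =====
-- inner loop: 'for i in range(n-1): cnt_list[i] = sum(cnt_list[i:])' (i runs over 0 ≤ i < n-1)
def peoplePass (n : Nat) (cnt : List Int) : List Int :=
  (List.range (n - 1)).foldl (fun c i => c.set i ((c.drop i).sum)) cnt

-- 'while k != 0: <pass>; k -= 1': runs exactly k times; Pre_ guarantees k ≥ 0
-- (for k < 0 the Python loop never terminates), so the fuel is k.toNat.
def peopleLoop (n : Nat) : Nat → List Int → List Int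
  | 0, c => c
  | k + 1, c => peopleLoop n k (peoplePass n c)

def people_num (house : List Int) : Int :=
  match house with
  | h0 :: h1 :: _ =>
    let k : Int := h0 - 1
    let n : Int := h1
    -- cnt_list = [1]*n ([] for n ≤ 0, as in Python)
    let cnt := peopleLoop n.toNat k.toNat (List.replicate n.toNat (1 : Int))
    -- sum([cnt_list[i] * (i+1) for i in range(n)]); 0 ≤ i < len(cnt_list), so getD is exact
    ((List.range n.toNat).map (fun i => cnt.getD i 0 * ((i : Int) + 1))).sum
  | _ => 0   -- house[0] / house[1] would raise IndexError; excluded by Pre_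

-- ===== PORT B =====
-- house[0] / house[1] read with getD: Pre_ guarantees house has ≥ 2 elements
-- (Python raises IndexError otherwise), so the default is never used.
def people_num_alt (house : List Int) : Int :=
  let f := house.getD 0 0
  let n := house.getD 1 0
  if n ≤ 0 then 0
  else (PySem.List.pyRange 1 (f + 2) 1).foldl
    (fun r i => PySem.Int.floordiv (r * (n - 1 + i)) i) 1

-- ===== PRECONDITION & SPEC =====
-- A needs two elements (house[0], house[1]: IndexError otherwise) and house[0] ≥ 1:
-- for house[0] < 1 the 'while k != 0' loop never terminates (k starts negative).
def Pre_people_num (house : List Int) : Prop := 2 ≤ house.length ∧ 1 ≤ house.headI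
instance (house : List Int) : Decidable (Pre_people_num house) := by unfold Pre_people_num; infer_instance
def pvWitness_people_num : List Int := [3, 6]

def Spec_people_num (house : List Int) (out : Int) : Prop := out = people_num_alt house
instance (house : List Int) (out : Int) : Decidable (Spec_people_num house out) := by unfold Spec_people_num; infer_instance

-- ===== CLAIM (what is proved, stated in full; the proofs are below) =====
def Claim_equal_people_num : Prop := ∀ (house : List Int), Dom_people_num house → Pre_people_num house → Spec_people_num house (people_num house)

-- ===== LEMMAS AND PROOFS =====

-- the list held by A after q suffix-sum passes on [1]*n: entry i is C(q + (n-1-i), q)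
def clist (q n : Nat) : List Int := (List.range n).map (fun i => (((q + (n - 1 - i)).choose q : Nat) : Int))

theorem clist_length (q n : Nat) : (clist q n).length = n := by simp [clist]

theorem clist_zero (n : Nat) : clist 0 n = List.replicate n (1 : Int) := by
  apply List.ext_getElem <;> simp [clist]

theorem clist_drop (q n i : Nat) (_hin : i ≤ n) : (clist q n).drop i = clist q (n - i) := by
  apply List.ext_getElem
  · simp [clist]
  · intro j h1 h2
    simp only [clist, List.getElem_drop, List.getElem_map, List.getElem_range]
    congr 2
    simp [clist] at h2
    omega

-- hockey stick, list form: ∑_{t<s} C(q + (s-1-t), q) = C(q+s, q+1)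
theorem clist_sum (q : Nat) : ∀ s : Nat, (clist q s).sum = (((q + s).choose (q + 1) : Nat) : Int) := by
  intro s
  induction s with
  | zero => simp [clist]
  | succ s ih =>
    rw [clist, List.range_succ_eq_map]
    simp only [List.map_cons, List.map_map, List.sum_cons]
    have h1 : (List.map ((fun i => (((q + (s + 1 - 1 - i)).choose q : Nat) : Int)) ∘ Nat.succ) (List.range s)).sum
        = (clist q s).sum := by
      unfold clist
      congr 1
      apply List.map_congr_left
      intro t ht
      simp only [Function.comp]
      rw [show s + 1 - 1 - t.succ = s - 1 - t by omega]
    rw [h1, ih]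
    have h2 : s + 1 - 1 - 0 = s := by omega
    rw [h2, show q + (s + 1) = (q + s) + 1 from rfl, Nat.choose_succ_succ' (q + s) q]
    push_cast
    ring

-- the in-place fold of A's inner loop, characterised: prefix of suffix sums ++ untouched tail
theorem pass_fold (c : List Int) : ∀ m, m ≤ c.length →
    (List.range m).foldl (fun c' i => c'.set i ((c'.drop i).sum)) c
      = (List.range m).map (fun i => ((c.drop i).sum)) ++ c.drop m := by
  intro m
  induction m with
  | zero => simp
  | succ m ih =>
    intro hm
    rw [List.range_succ, List.foldl_append, List.map_append, ih (by omega)]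
    have hlen : ((List.range m).map (fun i => ((c.drop i).sum))).length = m := by simp
    have hdrop : (((List.range m).map (fun i => ((c.drop i).sum))) ++ c.drop m).drop m = c.drop m := by
      have h := List.drop_left (l₁ := (List.range m).map (fun i => ((c.drop i).sum))) (l₂ := c.drop m)
      rwa [hlen] at h
    simp only [List.foldl_cons, List.foldl_nil, hdrop]
    rw [List.set_append, hlen]
    simp only [lt_irrefl, if_false, Nat.sub_self]
    rw [List.append_assoc]
    congr 1
    simp only [List.map_cons, List.map_nil, List.singleton_append]
    rw [List.drop_eq_getElem_cons (show m < c.length by omega), List.set_cons_zero]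

theorem pass_clist (q n : Nat) : peoplePass n (clist q n) = clist (q + 1) n := by
  rcases Nat.eq_zero_or_pos n with h | h
  · subst h; simp [peoplePass, clist]
  · unfold peoplePass
    rw [pass_fold (clist q n) (n - 1) (by rw [clist_length]; omega)]
    have h3 : List.range n = List.range (n - 1) ++ [n - 1] := by
      conv_lhs => rw [show n = (n - 1) + 1 by omega]
      rw [List.range_succ]
    have hG : clist (q + 1) n
        = (List.range (n - 1)).map (fun i => (((q + 1 + (n - 1 - i)).choose (q + 1) : Nat) : Int)) ++ [1] := by
      unfold clist
      rw [h3, List.map_append]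
      congr 1
      simp
    rw [hG]
    congr 1
    · apply List.map_congr_left
      intro i hi
      rw [List.mem_range] at hi
      rw [clist_drop q n i (by omega), clist_sum]
      have he : q + (n - i) = q + 1 + (n - 1 - i) := by omega
      rw [he]
    · rw [clist_drop q n (n - 1) (by omega), show n - (n - 1) = 1 by omega]
      simp [clist]

theorem loop_clist (n : Nat) : ∀ p q, peopleLoop n p (clist q n) = clist (q + p) n := by
  intro p
  induction p with
  | zero => intro q; simp [peopleLoop]
  | succ p ih =>
    intro q
    rw [peopleLoop, pass_clist, ih]
    congr 1
    omega

-- ∑_{i<len l} l[i] = l.sum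
theorem sum_getD (l : List Int) : ((List.range l.length).map (fun i => l.getD i 0)).sum = l.sum := by
  induction l with
  | nil => simp
  | cons a t ih =>
    rw [List.length_cons, List.range_succ_eq_map]
    simp only [List.map_cons, List.map_map, List.sum_cons, List.getD_cons_zero, List.sum_cons]
    rw [← ih]
    rfl

-- the weighted final sum IS the sum of all suffix sums
theorem weighted_eq_suffix (l : List Int) :
    ((List.range l.length).map (fun i => l.getD i 0 * ((i : Int) + 1))).sum
      = ((List.range l.length).map (fun i => (l.drop i).sum)).sum := by
  induction l with
  | nil => simp
  | cons a t ih =>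
    rw [List.length_cons, List.range_succ_eq_map]
    simp only [List.map_cons, List.map_map, List.sum_cons, List.getD_cons_zero,
      Nat.cast_zero, zero_add, mul_one, List.drop_zero, List.sum_cons]
    have hL : (List.map ((fun i => (a :: t).getD i 0 * ((i : Int) + 1)) ∘ Nat.succ) (List.range t.length)).sum
        = ((List.range t.length).map (fun i => t.getD i 0 * ((i : Int) + 1))).sum
          + ((List.range t.length).map (fun i => t.getD i 0)).sum := by
      rw [← PySem.List.sum_map_add_int]
      congr 1
      apply List.map_congr_left
      intro i _
      simp only [Function.comp, List.getD_cons_succ]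
      push_cast
      ring
    have hR : (List.map ((fun i => ((a :: t).drop i).sum) ∘ Nat.succ) (List.range t.length)).sum
        = ((List.range t.length).map (fun i => (t.drop i).sum)).sum := by
      rfl
    rw [hL, hR, ih, sum_getD]
    ring

-- A's value in closed form, for h0 ≥ 1
theorem people_num_closed (h0 h1 : Int) (rest : List Int) :
    people_num (h0 :: h1 :: rest)
      = ((((h0 - 1).toNat + 1 + h1.toNat).choose ((h0 - 1).toNat + 2) : Nat) : Int) := by
  show ((List.range h1.toNat).map
      (fun i => (peopleLoop h1.toNat (h0-1).toNat (List.replicate h1.toNat (1:Int))).getD i 0 * ((i : Int) + 1))).sum = _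
  rw [← clist_zero, loop_clist, Nat.zero_add]
  set p := (h0 - 1).toNat
  set n := h1.toNat
  have hlen : (clist p n).length = n := clist_length p n
  have hw := weighted_eq_suffix (clist p n)
  rw [hlen] at hw
  rw [hw]
  have h1' : ∀ i ∈ List.range n, ((clist p n).drop i).sum
      = ((((p + 1) + (n - 1 - i)).choose (p + 1) : Nat) : Int) := by
    intro i hi
    rw [List.mem_range] at hi
    rw [clist_drop p n i (by omega), clist_sum]
    congr 2
    omega
  rw [List.map_congr_left h1']
  have : ((List.range n).map (fun i => ((((p + 1) + (n - 1 - i)).choose (p + 1) : Nat) : Int))).sum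
      = (clist (p + 1) n).sum := rfl
  rw [this, clist_sum]

-- B's fold in closed form, for 1 ≤ n
theorem alt_fold_closed (n : Int) (hn : 1 ≤ n) : ∀ m : Nat,
    (PySem.List.pyRange 1 ((m : Int) + 1) 1).foldl
      (fun r i => PySem.Int.floordiv (r * (n - 1 + i)) i) 1
      = (((n.toNat - 1 + m).choose m : Nat) : Int) := by
  intro m
  induction m with
  | zero => simp [PySem.List.pyRange]
  | succ m ih =>
    have hstep : ((m : Int) + 1 + 1) = ((m : Int) + 1) + 1 := by ring
    rw [Nat.cast_succ, hstep, PySem.List.pyRange_one_succ_right (by omega), List.foldl_append]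
    simp only [List.foldl_cons, List.foldl_nil, ih]
    have harg : n - 1 + ((m : Int) + 1) = ((n.toNat + m : Nat) : Int) := by
      push_cast; omega
    rw [harg]
    have hmul : ((((n.toNat - 1 + m).choose m : Nat) : Int)) * ((n.toNat + m : Nat) : Int)
        = (((n.toNat - 1 + m).choose m * (n.toNat + m) : Nat) : Int) := by push_cast; ring
    rw [hmul, show (m : Int) + 1 = ((m + 1 : Nat) : Int) by push_cast; ring,
      PySem.Int.floordiv_natCast]
    have hident : (n.toNat - 1 + m).choose m * (n.toNat + m)
        = (n.toNat + m).choose (m + 1) * (m + 1) := by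
      have := Nat.add_one_mul_choose_eq (n.toNat - 1 + m) m
      have he : n.toNat - 1 + m + 1 = n.toNat + m := by omega
      rw [he] at this
      calc (n.toNat - 1 + m).choose m * (n.toNat + m)
          = (n.toNat + m) * (n.toNat - 1 + m).choose m := by ring
        _ = (n.toNat + m).choose (m + 1) * (m + 1) := by rw [this]
    rw [hident, Nat.mul_div_cancel _ (by omega),
      show n.toNat - 1 + (m + 1) = n.toNat + m by omega]

-- ===== VERDICT (by name: the statement is the Claim_ definition above) =====
theorem people_num_spec : Claim_equal_people_num := by
  intro house _ hpre
  obtain ⟨hlen, hhd⟩ := hpre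
  match house with
  | h0 :: h1 :: rest =>
    have hh0 : 1 ≤ h0 := hhd
    unfold Spec_people_num people_num_alt
    simp only [List.getD_cons_zero, List.getD_cons_succ]
    by_cases hn : h1 ≤ 0
    · simp only [hn, if_true]
      show ((List.range h1.toNat).map _).sum = 0
      have : h1.toNat = 0 := by omega
      rw [this]
      simp
    · simp only [hn, if_false]
      rw [people_num_closed h0 h1 rest]
      have hm : h0 + 2 = (((h0 - 1).toNat + 2 : Nat) : Int) + 1 := by push_cast; omega
      rw [hm, alt_fold_closed h1 (by omega)]
      congr 2
      omega
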